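-- pv_equiv track=rewrite | github.com/andrewtheguy/repetition_analyzer | repetition_analyzer/preprocess.py | truncate_hallucinated_repeats
-- ===== SOURCE A (Python) =====
-- def truncate_hallucinated_repeats(text: str, min_repeats: int = 10, max_pattern_len: int = 30) -> str:
--     """Truncate consecutively repeating patterns caused by speech-to-text hallucination."""
--     n = len(text)
--     if n < 100:
--         return text
--     for pat_len in range(2, min(max_pattern_len + 1, n // min_repeats + 1)):
--         for start in range(n - pat_len * min_repeats + 1):
--             pattern = text[start : start + pat_len]
--             pos = start + pat_len
--             count = 1
--             while pos + pat_len <= n and text[pos : pos + pat_len] == pattern: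
--                 count += 1
--                 pos += pat_len
--             if count >= min_repeats:
--                 return text[: start + pat_len] + "(indistinguishable speech)"
--     return text
-- ===== SOURCE B (Python) =====
-- def truncate_hallucinated_repeats(text: str, min_repeats: int = 10, max_pattern_len: int = 30) -> str:
--     """Truncate consecutively repeating patterns caused by speech-to-text hallucination.
--
--     One pass per period p: match[i] = (text[i] == text[i+p]); the earliest consecutive
--     run of p*(min_repeats-1) matches marks the earliest start with >= min_repeats repeats.
--     """
--     n = len(text)
--     if n < 100:
--         return text
--     for p in range(2, min(max_pattern_len + 1, n // min_repeats + 1)):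
--         need = p * (min_repeats - 1)
--         if need <= 0:
--             # min_repeats <= 1: a single occurrence already qualifies, at start 0
--             return text[:p] + "(indistinguishable speech)"
--         run = 0
--         for i in range(n - p):
--             if text[i] == text[i + p]:
--                 run += 1
--                 if run >= need:
--                     return text[: i + 1 - need + p] + "(indistinguishable speech)"
--             else:
--                 run = 0
--     return text
-- ===== Notes on version B (the rewrite author's own statement) =====
-- stated objective: alternative
-- what changed: Instead of re-comparing a sliced pattern block-by-block for every candidate start, B makes one linear scan per period p over the shift-by-p character matches text[i]==text[i+p], maintaining the current run length; the earliest run of length p*(min_repeats-1) is exactly the earliest start with >= min_repeats consecutive repeats. This removes the per-start inner while loop (quadratic per period in repeat-heavy cases) but is not measurably faster on a timing run's input family.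
import Mathlib
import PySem

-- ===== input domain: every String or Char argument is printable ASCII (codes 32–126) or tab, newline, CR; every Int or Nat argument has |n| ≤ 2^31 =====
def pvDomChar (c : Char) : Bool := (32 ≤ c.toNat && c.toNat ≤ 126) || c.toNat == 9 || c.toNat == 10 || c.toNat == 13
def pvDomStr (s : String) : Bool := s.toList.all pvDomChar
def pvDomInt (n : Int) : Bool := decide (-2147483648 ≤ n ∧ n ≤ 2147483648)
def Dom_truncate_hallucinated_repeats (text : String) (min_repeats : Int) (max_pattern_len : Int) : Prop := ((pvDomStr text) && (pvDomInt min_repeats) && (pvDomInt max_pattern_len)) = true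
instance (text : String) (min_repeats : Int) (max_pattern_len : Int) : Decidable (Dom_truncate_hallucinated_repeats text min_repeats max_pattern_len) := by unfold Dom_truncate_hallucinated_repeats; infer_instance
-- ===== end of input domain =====

-- ===== PORT A =====
-- B replaces A's per-start block re-comparison by one run-length scan of shift-by-p matches per period (objective: alternative algorithm, same return value).
def pvMarker : List Char := "(indistinguishable speech)".toList

-- the inner `while` loop of A (0 < p guard only makes the recursion total; A only calls it with 2 <= p)
def pvAWhile (cs pat : List Char) (p n : Int) (pos count : Int) : Int :=
  if h : 0 < p ∧ pos + p ≤ n ∧ PySem.List.slice cs (some pos) (some (pos + p)) = pat then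
    pvAWhile cs pat p n (pos + p) (count + 1)
  else count
termination_by (n - pos).toNat
decreasing_by omega

-- `for start in range(n - pat_len*min_repeats + 1)` with its early return
def pvAInner (cs : List Char) (n m p : Int) : List Int → Option (List Char)
  | [] => none
  | s :: rest =>
    let pat := PySem.List.slice cs (some s) (some (s + p))
    let count := pvAWhile cs pat p n (s + p) 1
    if m ≤ count then some (PySem.List.slice cs none (some (s + p)) ++ pvMarker)
    else pvAInner cs n m p rest

-- `for pat_len in range(2, ...)` with its early return
def pvAOuter (cs : List Char) (n m : Int) : List Int → Option (List Char)
  | [] => none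
  | p :: rest =>
    match pvAInner cs n m p (PySem.List.pyRange 0 (n - p * m + 1) 1) with
    | some r => some r
    | none => pvAOuter cs n m rest

def truncate_hallucinated_repeats (text : String) (min_repeats : Int) (max_pattern_len : Int) : String :=
  let cs := text.toList
  let n : Int := cs.length
  if n < 100 then text
  else
    match pvAOuter cs n min_repeats
        (PySem.List.pyRange 2 (min (max_pattern_len + 1) (PySem.Int.floordiv n min_repeats + 1)) 1) with
    | some r => String.ofList r
    | none => text

-- ===== PORT B =====
-- B's linear scan per period p: run-length of consecutive `text[i] == text[i+p]` matches
def pvBScan (cs : List Char) (p need : Int) : List Int → Int → Option (List Char)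
  | [], _ => none
  | i :: rest, run =>
    if PySem.List.pyGet? cs i = PySem.List.pyGet? cs (i + p) then
      if need ≤ run + 1 then some (PySem.List.slice cs none (some (i + 1 - need + p)) ++ pvMarker)
      else pvBScan cs p need rest (run + 1)
    else pvBScan cs p need rest 0

def pvBInner (cs : List Char) (n m p : Int) : Option (List Char) :=
  let need := p * (m - 1)
  if need ≤ 0 then some (PySem.List.slice cs none (some p) ++ pvMarker)
  else pvBScan cs p need (PySem.List.pyRange 0 (n - p) 1) 0

def pvBOuter (cs : List Char) (n m : Int) : List Int → Option (List Char)
  | [] => none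
  | p :: rest =>
    match pvBInner cs n m p with
    | some r => some r
    | none => pvBOuter cs n m rest

def truncate_hallucinated_repeats_alt (text : String) (min_repeats : Int) (max_pattern_len : Int) : String :=
  let cs := text.toList
  let n : Int := cs.length
  if n < 100 then text
  else
    match pvBOuter cs n min_repeats
        (PySem.List.pyRange 2 (min (max_pattern_len + 1) (PySem.Int.floordiv n min_repeats + 1)) 1) with
    | some r => String.ofList r
    | none => text

-- ===== PRECONDITION & SPEC =====
-- Pre_ excludes only min_repeats = 0 on texts of length >= 100: there `n // min_repeats` raises
-- ZeroDivisionError in Python (in A and in B alike).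
def Pre_truncate_hallucinated_repeats (text : String) (min_repeats : Int) (max_pattern_len : Int) : Prop :=
  text.toList.length < 100 ∨ min_repeats ≠ 0
instance (text : String) (min_repeats : Int) (max_pattern_len : Int) : Decidable (Pre_truncate_hallucinated_repeats text min_repeats max_pattern_len) := by unfold Pre_truncate_hallucinated_repeats; infer_instance

def pvWitness_truncate_hallucinated_repeats : String × Int × Int := ("abcabcabc", 10, 30)

def Spec_truncate_hallucinated_repeats (text : String) (min_repeats : Int) (max_pattern_len : Int) (out : String) : Prop := out = truncate_hallucinated_repeats_alt text min_repeats max_pattern_len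
instance (text : String) (min_repeats : Int) (max_pattern_len : Int) (out : String) : Decidable (Spec_truncate_hallucinated_repeats text min_repeats max_pattern_len out) := by unfold Spec_truncate_hallucinated_repeats; infer_instance


-- ===== CLAIM (what is proved, stated in full; the proofs are below) =====
def Claim_equal_truncate_hallucinated_repeats : Prop := ∀ (text : String) (min_repeats : Int) (max_pattern_len : Int), Dom_truncate_hallucinated_repeats text min_repeats max_pattern_len → Pre_truncate_hallucinated_repeats text min_repeats max_pattern_len → Spec_truncate_hallucinated_repeats text min_repeats max_pattern_len (truncate_hallucinated_repeats text min_repeats max_pattern_len)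

-- ===== LEMMAS AND PROOFS =====


-- proof-side notions: a "window" of shift-by-p matches, and the first window in range
def pvWin (cs : List Char) (pN need s : Nat) : Bool :=
  (List.range need).all (fun j => cs[s+j]? == cs[s+j+pN]?)

def pvFind (cs : List Char) (pN need N' s0 : Nat) : Option Nat :=
  (List.range' s0 (N' - s0)).find? (pvWin cs pN need)

def pvOut (cs : List Char) (pN s : Nat) : List Char := cs.take (s + pN) ++ pvMarker

lemma pvAWhile_ge (cs pat : List Char) (p n : Int) (pos count : Int) :
    count ≤ pvAWhile cs pat p n pos count := by
  fun_induction pvAWhile with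
  | case1 pos count h ih => omega
  | case2 pos count h => omega

lemma pvAWhile_count_iff (cs pat : List Char) (p n : Int) (hp : 0 < p) :
    ∀ (k : Nat) (pos count : Int), pos + p * k ≤ n →
      (count + k ≤ pvAWhile cs pat p n pos count ↔
        ∀ t : Nat, t < k →
          PySem.List.slice cs (some (pos + p * t)) (some (pos + p * t + p)) = pat) := by
  intro k
  induction k with
  | zero =>
    intro pos count _
    simp only [Nat.cast_zero, add_zero]
    constructor
    · intro _ t ht; omega
    · intro _; exact pvAWhile_ge cs pat p n pos count
  | succ k ih =>
    intro pos count hbound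
    have hpk : (0:Int) ≤ p * k := by positivity
    have hstep : pos + p ≤ n := by push_cast at hbound ⊢; nlinarith
    rw [pvAWhile]
    by_cases hc : PySem.List.slice cs (some pos) (some (pos + p)) = pat
    · rw [dif_pos ⟨hp, hstep, hc⟩]
      have hb2 : (pos + p) + p * k ≤ n := by push_cast at hbound ⊢; nlinarith
      have := ih (pos + p) (count + 1) hb2
      constructor
      · intro H t ht
        rcases Nat.eq_zero_or_pos t with rfl | htpos
        · simpa using hc
        · obtain ⟨t', rfl⟩ := Nat.exists_eq_succ_of_ne_zero (by omega : t ≠ 0)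
          have := (this.mp (by push_cast at H ⊢; omega)) t' (by omega)
          convert this using 3 <;> push_cast <;> ring
      · intro H
        have : count + 1 + (k:Int) ≤ pvAWhile cs pat p n (pos + p) (count + 1) := by
          apply (ih (pos + p) (count + 1) hb2).mpr
          intro t ht
          have := H (t+1) (by omega)
          convert this using 3 <;> push_cast <;> ring
        push_cast; omega
    · rw [dif_neg (by tauto)]
      constructor
      · intro H; exfalso; push_cast at H; omega
      · intro H
        exfalso
        have := H 0 (by omega)
        simp only [Nat.cast_zero, mul_zero, add_zero] at this
        exact hc this


lemma pvSliceEq_iff (cs : List Char) (a b pN : Nat) :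
    (PySem.List.slice cs (some (a:Int)) (some ((a:Int)+(pN:Int))) =
      PySem.List.slice cs (some (b:Int)) (some ((b:Int)+(pN:Int)))) ↔
    ∀ j < pN, cs[a+j]? = cs[b+j]? := by
  rw [PySem.List.slice_natCast_add, PySem.List.slice_natCast_add]
  constructor
  · intro H j hj
    have := congrArg (fun l => l[j]?) H
    simpa [List.getElem?_take, hj, List.getElem?_drop] using this
  · intro H
    apply List.ext_getElem?
    intro j
    by_cases hj : j < pN
    · simpa [List.getElem?_take, hj, List.getElem?_drop] using H j hj
    · simp [hj]

lemma pvChain_aux (pN K : Nat) (f : Nat → Option Char)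
    (hshift : ∀ i < pN * K, f i = f (i + pN)) :
    ∀ t ≤ K, ∀ j < pN, f (pN * t + j) = f j := by
  intro t
  induction t with
  | zero => intro _ j _; simp
  | succ t ih =>
    intro ht j hj
    have h1 : pN * t + j < pN * K := by
      have : pN * t + pN ≤ pN * K := by
        have := Nat.mul_le_mul_left pN ht
        rw [Nat.mul_succ] at this; omega
      omega
    have := hshift (pN * t + j) h1
    rw [Nat.mul_succ]
    have e : pN * t + pN + j = pN * t + j + pN := by omega
    rw [e, ← this]
    exact ih (by omega) j hj

lemma pvChain_iff (pN K : Nat) (hp : 0 < pN) (f : Nat → Option Char) :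
    (∀ t < K, ∀ j < pN, f (pN * (t+1) + j) = f j) ↔ (∀ i < pN * K, f i = f (i + pN)) := by
  constructor
  · intro hb i hi
    have hj : i % pN < pN := Nat.mod_lt _ hp
    have hdecomp : pN * (i / pN) + i % pN = i := Nat.div_add_mod i pN
    have ht : i / pN < K := by
      by_contra hcon
      have : pN * K ≤ pN * (i / pN) := Nat.mul_le_mul_left pN (by omega)
      omega
    have h2 : f (pN * (i / pN + 1) + i % pN) = f (i % pN) := hb (i / pN) ht (i % pN) hj
    have h3 : f i = f (i % pN) := by
      rcases Nat.eq_zero_or_pos (i / pN) with h0 | h0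
      · rw [← hdecomp, h0]; simp
      · have h4 := hb (i / pN - 1) (by omega) (i % pN) hj
        rw [Nat.sub_add_cancel h0] at h4
        calc f i = f (pN * (i / pN) + i % pN) := by rw [hdecomp]
          _ = f (i % pN) := h4
    rw [h3, ← h2]
    congr 1
    rw [Nat.mul_succ]; omega
  · intro hs t ht j hj
    exact pvChain_aux pN K f hs (t+1) (by omega) j hj


lemma pvWin_iff (cs : List Char) (pN need s : Nat) :
    pvWin cs pN need s = true ↔ ∀ i < need, cs[s+i]? = cs[s+i+pN]? := by
  simp [pvWin]

lemma pvCount_iff_win (cs : List Char) (n : Int) (pN mN s : Nat)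
    (hn : n = (cs.length : Int)) (hp : 2 ≤ pN) (hm : 2 ≤ mN)
    (hs : s + pN * mN ≤ cs.length) :
    (((mN:Nat):Int) ≤ pvAWhile cs
        (PySem.List.slice cs (some (s:Int)) (some ((s:Int)+(pN:Int)))) (pN:Int) n ((s:Int)+(pN:Int)) 1
      ↔ pvWin cs pN (pN*(mN-1)) s = true) := by
  obtain ⟨k, rfl⟩ : ∃ k, mN = k + 2 := ⟨mN - 2, by omega⟩
  have hsn : s + pN + pN * (k+1) ≤ cs.length := by
    have : pN * (k+2) = pN + pN * (k+1) := by ring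
    omega
  have hbound : ((s:Int)+(pN:Int)) + (pN:Int) * ((k+1:Nat):Int) ≤ n := by
    rw [hn]; exact_mod_cast hsn
  have hcnt := pvAWhile_count_iff cs
      (PySem.List.slice cs (some (s:Int)) (some ((s:Int)+(pN:Int)))) (pN:Int) n
      (by exact_mod_cast Nat.lt_of_lt_of_le (by omega) hp) (k+1) ((s:Int)+(pN:Int)) 1 hbound
  have hlhs : (((k+2:Nat):Int) ≤ pvAWhile cs
        (PySem.List.slice cs (some (s:Int)) (some ((s:Int)+(pN:Int)))) (pN:Int) n ((s:Int)+(pN:Int)) 1)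
      ↔ ((1:Int) + ((k+1:Nat):Int) ≤ pvAWhile cs
        (PySem.List.slice cs (some (s:Int)) (some ((s:Int)+(pN:Int)))) (pN:Int) n ((s:Int)+(pN:Int)) 1) := by
    push_cast; constructor <;> (intro; omega)
  rw [hlhs, hcnt]
  have hblocks : ∀ t : Nat,
      (PySem.List.slice cs (some ((s:Int)+(pN:Int)+(pN:Int)*(t:Int)))
          (some ((s:Int)+(pN:Int)+(pN:Int)*(t:Int)+(pN:Int))) =
        PySem.List.slice cs (some (s:Int)) (some ((s:Int)+(pN:Int))))
      ↔ ∀ j < pN, cs[(s+pN*(t+1))+j]? = cs[s+j]? := by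
    intro t
    have e1 : (s:Int)+(pN:Int)+(pN:Int)*(t:Int) = (((s+pN*(t+1)) : Nat):Int) := by
      push_cast; ring
    rw [e1]
    exact pvSliceEq_iff cs _ s pN
  have hA : (∀ t, t < k+1 → ∀ j < pN, cs[s+(pN*(t+1)+j)]? = cs[s+j]?)
      ↔ (∀ i, i < pN*(k+1) → cs[s+i]? = cs[s+(i+pN)]?) :=
    pvChain_iff pN (k+1) (by omega) (fun i => cs[s+i]?)
  have hneed : (k+2) - 1 = k + 1 := by omega
  rw [hneed, pvWin_iff]
  constructor
  · intro H i hi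
    have hshift := hA.mp (by
      intro t ht j hj
      have := (hblocks t).mp (H t ht) j hj
      calc cs[s+(pN*(t+1)+j)]? = cs[(s+pN*(t+1))+j]? := by rw [Nat.add_assoc]
        _ = cs[s+j]? := this)
    have := hshift i hi
    calc cs[s+i]? = cs[s+(i+pN)]? := this
      _ = cs[s+i+pN]? := by rw [Nat.add_assoc]
  · intro H t ht
    apply (hblocks t).mpr
    intro j hj
    have hshift : ∀ i, i < pN*(k+1) → cs[s+i]? = cs[s+(i+pN)]? := by
      intro i hi
      calc cs[s+i]? = cs[s+i+pN]? := H i hi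
        _ = cs[s+(i+pN)]? := by rw [Nat.add_assoc]
    have := hA.mpr hshift t ht j hj
    calc cs[(s+pN*(t+1))+j]? = cs[s+(pN*(t+1)+j)]? := by rw [Nat.add_assoc]
      _ = cs[s+j]? := this


lemma pvAInner_eq (cs : List Char) (n m : Int) (pN need : Nat) (l : List Nat)
    (hpt : ∀ s ∈ l,
      (m ≤ pvAWhile cs (PySem.List.slice cs (some (s:Int)) (some ((s:Int)+(pN:Int))))
          (pN:Int) n ((s:Int)+(pN:Int)) 1
        ↔ pvWin cs pN need s = true)) :
    pvAInner cs n m (pN:Int) (l.map Int.ofNat) =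
      (l.find? (pvWin cs pN need)).map (pvOut cs pN) := by
  induction l with
  | nil => rfl
  | cons s rest ih =>
    rw [List.map_cons]
    simp only [pvAInner, Int.ofNat_eq_natCast]
    by_cases hw : pvWin cs pN need s = true
    · rw [if_pos ((hpt s (by simp)).mpr hw), List.find?_cons_of_pos hw]
      have e : (s:Int)+(pN:Int) = ((s+pN : Nat):Int) := by push_cast; ring
      rw [e, PySem.List.slice_to_natCast]
      rfl
    · rw [if_neg (fun hc => hw ((hpt s (by simp)).mp hc)),
        List.find?_cons_of_neg (by simpa using hw)]
      exact ih (fun s' hs' => hpt s' (by simp [hs']))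

lemma pvFind_stop (cs : List Char) (pN need N' s0 : Nat) (h : N' ≤ s0) :
    pvFind cs pN need N' s0 = none := by
  unfold pvFind
  rw [Nat.sub_eq_zero_of_le h]
  rfl

lemma pvFind_step (cs : List Char) (pN need N' s0 : Nat) (h : s0 < N') :
    pvFind cs pN need N' s0 =
      if pvWin cs pN need s0 then some s0 else pvFind cs pN need N' (s0+1) := by
  unfold pvFind
  have e : N' - s0 = (N' - (s0+1)) + 1 := by omega
  rw [e, List.range'_succ]
  by_cases hw : pvWin cs pN need s0 = true
  · rw [List.find?_cons_of_pos hw, if_pos hw]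
  · rw [List.find?_cons_of_neg (by simpa using hw), if_neg (by simpa using hw)]

lemma pvFind_skip (cs : List Char) (pN need N' : Nat) :
    ∀ (d s0 : Nat), (∀ s, s0 ≤ s → s < s0 + d → ¬ (pvWin cs pN need s = true)) →
      pvFind cs pN need N' s0 = pvFind cs pN need N' (s0 + d) := by
  intro d
  induction d with
  | zero => simp
  | succ d ih =>
    intro s0 hno
    by_cases h : s0 < N'
    · rw [pvFind_step cs pN need N' s0 h, if_neg (hno s0 (le_refl _) (by omega))]
      rw [ih (s0+1) (fun s hs1 hs2 => hno s (by omega) (by omega))]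
      congr 1
      omega
    · rw [pvFind_stop cs pN need N' s0 (by omega), pvFind_stop cs pN need N' _ (by omega)]


lemma pvBScan_eq (cs : List Char) (pN k : Nat) (hp : 2 ≤ pN)
    (hNm : pN * (k+2) ≤ cs.length) :
    ∀ (cnt i0 r : Nat), r ≤ i0 → r < pN*(k+1) → i0 + cnt = cs.length - pN →
      (∀ j < r, cs[(i0-r)+j]? = cs[(i0-r)+j+pN]?) →
      pvBScan cs (pN:Int) ((pN*(k+1) : Nat):Int) ((List.range' i0 cnt).map Int.ofNat) (r:Int)
        = (pvFind cs pN (pN*(k+1)) (cs.length - pN*(k+2) + 1) (i0 - r)).map (pvOut cs pN) := by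
  have hid : pN*(k+2) = pN*(k+1) + pN := by ring
  intro cnt
  induction cnt with
  | zero =>
    intro i0 r hr hrn hi hmatch
    rw [pvFind_stop cs pN _ _ _ (by omega)]
    rfl
  | succ cnt ih =>
    intro i0 r hr hrn hi hmatch
    rw [List.range'_succ, List.map_cons]
    simp only [pvBScan, Int.ofNat_eq_natCast]
    have hget : (PySem.List.pyGet? cs ((i0:Nat):Int) = PySem.List.pyGet? cs (((i0:Nat):Int) + (pN:Int)))
        ↔ cs[i0]? = cs[i0+pN]? := by
      rw [show ((i0:Nat):Int)+(pN:Int) = ((i0+pN : Nat):Int) by push_cast; ring]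
      rw [PySem.List.pyGet?_natCast, PySem.List.pyGet?_natCast]
    by_cases hmt : cs[i0]? = cs[i0+pN]?
    · rw [if_pos (hget.mpr hmt)]
      by_cases htr : ((pN*(k+1) : Nat):Int) ≤ (r:Int) + 1
      · rw [if_pos htr]
        have hrneed : r + 1 = pN*(k+1) := by
          have : (pN*(k+1) : Nat) ≤ r + 1 := by exact_mod_cast htr
          omega
        have e : ((i0:Nat):Int) + 1 - ((pN*(k+1) : Nat):Int) + (pN:Int) = (((i0-r) + pN : Nat):Int) := by
          rw [← hrneed]; push_cast; omega
        rw [e, PySem.List.slice_to_natCast]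
        have hwin : pvWin cs pN (pN*(k+1)) (i0-r) = true := by
          rw [pvWin_iff]
          intro i hi2
          rcases Nat.lt_or_ge i r with h | h
          · exact hmatch i h
          · have hir : i = r := by omega
            subst hir
            rw [show (i0-i) + i = i0 by omega]
            exact hmt
        rw [pvFind_step cs pN _ _ (i0-r) (by omega), if_pos hwin]
        rfl
      · rw [if_neg htr]
        have hr1 : r + 1 < pN*(k+1) := by
          have : ¬ ((pN*(k+1) : Nat) ≤ r + 1) := by exact_mod_cast htr
          omega
        have hstep := ih (i0+1) (r+1) (by omega) hr1 (by omega) (by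
          intro j hj
          rcases Nat.lt_or_ge j r with h | h
          · have := hmatch j h
            rw [show (i0+1)-(r+1) = i0-r by omega]
            exact this
          · have hjr : j = r := by omega
            subst hjr
            rw [show (i0+1)-(j+1)+j = i0 by omega]
            exact hmt)
        rw [show (r:Int)+1 = (((r+1):Nat):Int) by push_cast; ring, hstep,
          show (i0+1)-(r+1) = i0-r by omega]
    · rw [if_neg (fun hc => hmt (hget.mp hc))]
      have hstep := ih (i0+1) 0 (by omega) (by
          have : 0 < pN*(k+1) := by positivity
          omega) (by omega) (by intro j hj; omega)
      rw [show ((0:Nat):Int) = (0:Int) by norm_num] at hstep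
      rw [hstep, show (i0+1)-0 = i0+1 by omega]
      have hskip := pvFind_skip cs pN (pN*(k+1)) (cs.length - pN*(k+2) + 1) (r+1) (i0-r) (by
        intro s hs1 hs2 hw
        rw [pvWin_iff] at hw
        have hj : i0 - s < pN*(k+1) := by omega
        have hbad := hw (i0-s) hj
        rw [show s + (i0-s) = i0 by omega] at hbad
        exact hmt hbad)
      rw [show (i0-r) + (r+1) = i0+1 by omega] at hskip
      rw [← hskip]


lemma pvInner_eq (cs : List Char) (n m p : Int) (hn : n = (cs.length:Int))
    (hp : 2 ≤ p) (hm : 1 ≤ m) (hpm : p * m ≤ n) :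
    pvAInner cs n m p (PySem.List.pyRange 0 (n - p*m + 1) 1) = pvBInner cs n m p := by
  subst hn
  obtain ⟨pN, rfl⟩ : ∃ pN : Nat, p = (pN:Int) := ⟨p.toNat, (Int.toNat_of_nonneg (by omega)).symm⟩
  obtain ⟨mN, rfl⟩ : ∃ mN : Nat, m = (mN:Int) := ⟨m.toNat, (Int.toNat_of_nonneg (by omega)).symm⟩
  have hp2 : 2 ≤ pN := by exact_mod_cast hp
  have hm1 : 1 ≤ mN := by exact_mod_cast hm
  have hpmN : pN * mN ≤ cs.length := by
    have h1 : (pN:Int)*(mN:Int) = ((pN*mN : Nat):Int) := by push_cast; ring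
    rw [h1] at hpm
    exact_mod_cast hpm
  rcases eq_or_lt_of_le hm1 with hm1' | hm2
  · -- min_repeats = 1: both return at start 0 / directly
    obtain rfl : mN = 1 := hm1'.symm
    have hplen : pN ≤ cs.length := by omega
    have hlist : PySem.List.pyRange 0 ((cs.length:Int) - (pN:Int)*((1:Nat):Int) + 1) 1 =
        0 :: PySem.List.pyRange 1 ((cs.length:Int) - (pN:Int)*((1:Nat):Int) + 1) 1 := by
      apply PySem.List.pyRange_one_cons
      have h1 : (pN:Int)*((1:Nat):Int) = (pN:Int) := by push_cast; ring
      rw [h1]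
      omega
    rw [hlist]
    simp only [pvAInner, pvBInner]
    rw [if_pos (by exact_mod_cast pvAWhile_ge cs _ (pN:Int) (cs.length:Int) (0 + (pN:Int)) 1)]
    have e1 : (pN:Int)*(((1:Nat):Int) - 1) = 0 := by push_cast; ring
    rw [e1, if_pos (le_refl (0:Int))]
    norm_num
  · obtain ⟨k, rfl⟩ : ∃ k, mN = k + 2 := ⟨mN - 2, by omega⟩
    have hprod : (pN:Int)*((k+2:Nat):Int) = ((pN*(k+2) : Nat):Int) := by push_cast; ring
    -- A side
    have hX : (cs.length:Int) - (pN:Int)*((k+2:Nat):Int) + 1 =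
        ((cs.length - pN*(k+2) + 1 : Nat):Int) := by
      rw [hprod]; omega
    have hAl : PySem.List.pyRange 0 ((cs.length:Int) - (pN:Int)*((k+2:Nat):Int) + 1) 1 =
        (List.range (cs.length - pN*(k+2) + 1)).map Int.ofNat := by
      rw [hX, PySem.List.pyRange_one]
      simp
    rw [hAl, pvAInner_eq cs (cs.length:Int) ((k+2:Nat):Int) pN (pN*(k+1))
      (List.range (cs.length - pN*(k+2) + 1)) (by
        intro s hs
        rw [List.mem_range] at hs
        have hs2 : s + pN*(k+2) ≤ cs.length := by omega
        have := pvCount_iff_win cs (cs.length:Int) pN (k+2) s rfl hp2 (by omega) hs2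
        rw [show (k+2) - 1 = k+1 by omega] at this
        exact this)]
    -- B side
    simp only [pvBInner]
    have e2 : (pN:Int)*(((k+2:Nat):Int) - 1) = ((pN*(k+1) : Nat):Int) := by push_cast; ring
    rw [e2, if_neg (by
      have : 0 < pN*(k+1) := by positivity
      have : (0:Int) < ((pN*(k+1) : Nat):Int) := by exact_mod_cast this
      omega)]
    have hplen2 : pN ≤ cs.length := le_trans (Nat.le_mul_of_pos_right pN (by omega)) hpmN
    have hBl : PySem.List.pyRange 0 ((cs.length:Int) - (pN:Int)) 1 =
        (List.range' 0 (cs.length - pN)).map Int.ofNat := by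
      rw [show (cs.length:Int) - (pN:Int) = ((cs.length - pN : Nat):Int) by omega,
        PySem.List.pyRange_one, ← List.range_eq_range']
      simp
    rw [hBl, show (0:Int) = ((0:Nat):Int) by norm_num,
      pvBScan_eq cs pN k hp2 (by exact_mod_cast hpmN) (cs.length - pN) 0 0 (le_refl 0)
        (by positivity) (by omega) (by intro j hj; omega)]
    rw [pvFind]
    rw [← List.range_eq_range']
    rfl

lemma pvOuter_eq (cs : List Char) (n m : Int) (hn : n = (cs.length:Int)) (hm : 1 ≤ m) :
    ∀ l : List Int, (∀ p ∈ l, 2 ≤ p ∧ p * m ≤ n) →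
      pvAOuter cs n m l = pvBOuter cs n m l := by
  intro l
  induction l with
  | nil => intro _; rfl
  | cons p rest ih =>
    intro hl
    simp only [pvAOuter, pvBOuter]
    rw [pvInner_eq cs n m p hn (hl p (by simp)).1 hm (hl p (by simp)).2]
    cases h : pvBInner cs n m p with
    | some r => rfl
    | none => exact ih (fun q hq => hl q (by simp [hq]))

-- ===== VERDICT =====
theorem truncate_hallucinated_repeats_spec : Claim_equal_truncate_hallucinated_repeats := by
  unfold Claim_equal_truncate_hallucinated_repeats
  intro text m maxlen _hD hPre
  unfold Spec_truncate_hallucinated_repeats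
  unfold truncate_hallucinated_repeats truncate_hallucinated_repeats_alt
  dsimp only
  by_cases h100 : ((text.toList.length : Nat):Int) < 100
  · rw [if_pos h100, if_pos h100]
  · rw [if_neg h100, if_neg h100]
    have hm0 : m ≠ 0 := by
      unfold Pre_truncate_hallucinated_repeats at hPre
      rcases hPre with h | h
      · exact absurd (by exact_mod_cast h) h100
      · exact h
    rcases Int.lt_or_le m 0 with hmneg | hmpos
    · have hq := PySem.Int.floordiv_mul_add_mod ((text.toList.length:Nat):Int) m
      have hr := (PySem.Int.mod_neg_bounds (a := ((text.toList.length:Nat):Int)) (by omega : m < 0)).2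
      have hK : PySem.Int.floordiv ((text.toList.length:Nat):Int) m ≤ 0 := by
        by_contra hpos
        rw [not_le] at hpos
        have h1 : PySem.Int.floordiv ((text.toList.length:Nat):Int) m * m ≤ 1 * m :=
          mul_le_mul_of_nonpos_right (by omega) (by omega)
        omega
      have hlist : PySem.List.pyRange 2
          (min (maxlen + 1) (PySem.Int.floordiv ((text.toList.length:Nat):Int) m + 1)) 1 = [] := by
        apply PySem.List.pyRange_one_eq_nil
        have := min_le_right (maxlen + 1) (PySem.Int.floordiv ((text.toList.length:Nat):Int) m + 1)
        omega
      rw [hlist]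
      rfl
    · have hm1 : 1 ≤ m := by omega
      rw [pvOuter_eq text.toList ((text.toList.length:Nat):Int) m rfl hm1 _ (by
        intro p hp
        rw [PySem.List.mem_pyRange_one] at hp
        refine ⟨hp.1, ?_⟩
        have hple : p ≤ PySem.Int.floordiv ((text.toList.length:Nat):Int) m := by
          have := min_le_right (maxlen + 1) (PySem.Int.floordiv ((text.toList.length:Nat):Int) m + 1)
          omega
        exact (PySem.Int.le_floordiv_iff_mul_le (by omega)).mp hple)]
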